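-- pv_equiv track=rewrite | github.com/viet-ha-pham/coolword | coolword.py | yoohet
-- ===== SOURCE A (Python) =====
-- def yoohet(word1, word2):
--     rev_word1 = word1[::-1]
--     rev_word2 = word2[::-1]
--
--     common_index = None
--     for i in range(len(rev_word2)):
--         for j in range(len(rev_word1)):
--             if rev_word2[i] == rev_word1[j]:
--                 common_index = (i, j)
--
--     if common_index == None:
--         return rev_word2[:len(rev_word2)//2] + rev_word1[:len(rev_word1)//2]
--
--     return rev_word2[:common_index[0]] + rev_word1[common_index[1]:]
-- ===== SOURCE B (Python) =====
-- def yoohet(word1, word2):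
--     rev1 = word1[::-1]
--     rev2 = word2[::-1]
--     last_j = {c: j for j, c in enumerate(rev1)}
--     for i in range(len(rev2) - 1, -1, -1):
--         j = last_j.get(rev2[i])
--         if j is not None:
--             return rev2[:i] + rev1[j:]
--     return rev2[:len(rev2)//2] + rev1[:len(rev1)//2]
-- ===== Notes on version B (the rewrite author's own statement) =====
-- stated objective: faster
-- what changed: Replaced the O(n*m) nested scan over both reversed words by a one-pass char-to-last-index dict over reversed word1 plus a single descending scan over reversed word2 that returns at the first (highest) matching index.
import Mathlib
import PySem

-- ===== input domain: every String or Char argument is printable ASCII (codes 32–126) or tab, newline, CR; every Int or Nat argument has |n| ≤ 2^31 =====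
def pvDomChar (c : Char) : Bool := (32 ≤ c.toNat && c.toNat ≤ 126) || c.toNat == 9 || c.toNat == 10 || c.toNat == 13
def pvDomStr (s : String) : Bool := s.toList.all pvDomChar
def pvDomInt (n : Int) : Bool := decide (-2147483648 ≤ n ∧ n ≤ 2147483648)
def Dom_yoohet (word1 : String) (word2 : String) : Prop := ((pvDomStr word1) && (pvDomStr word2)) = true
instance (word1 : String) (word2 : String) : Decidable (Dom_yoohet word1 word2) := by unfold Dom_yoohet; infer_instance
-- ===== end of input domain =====

-- B replaces A's O(n*m) nested scan by a char→last-index dict over reversed word1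
-- and a descending scan over reversed word2 that returns at the first (= highest) match: O(n+m).


-- ===== PORT A =====
-- literal port of A: reverse both words, nested index loops keep overwriting
-- common_index, then slice.  (range-loop → foldl over List.range; xs[i] with i
-- always in range → getD, exact here.)
def yoohetCommon (rev1 rev2 : List Char) : Option (Nat × Nat) :=
  (List.range rev2.length).foldl
    (fun ci i =>
      (List.range rev1.length).foldl
        (fun ci j => if rev2.getD i ' ' = rev1.getD j ' ' then some (i, j) else ci)
        ci)
    none

def yoohet (word1 : String) (word2 : String) : String :=
  let rev1 := word1.toList.reverse
  let rev2 := word2.toList.reverse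
  let ci := yoohetCommon rev1 rev2
  String.ofList (match ci with
    | none => rev2.take (rev2.length / 2) ++ rev1.take (rev1.length / 2)
    | some (i, j) => rev2.take i ++ rev1.drop j)

-- ===== PORT B =====
-- port of Source B: dict {c: j for j, c in enumerate(rev1)} (later j overwrites),
-- then scan i from len(rev2)-1 down to 0, returning at the first hit.
def yoohetLastIdx (rev1 : List Char) : PySem.Dict Char Nat :=
  rev1.zipIdx.foldl (fun d p => d.insert p.1 p.2) PySem.Dict.empty

def yoohetScan (rev1 rev2 : List Char) (d : PySem.Dict Char Nat) : Nat → List Char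
  | 0 => rev2.take (rev2.length / 2) ++ rev1.take (rev1.length / 2)
  | i + 1 =>
    match d.get? (rev2.getD i ' ') with
    | some j => rev2.take i ++ rev1.drop j
    | none => yoohetScan rev1 rev2 d i

def yoohet_alt (word1 : String) (word2 : String) : String :=
  let rev1 := word1.toList.reverse
  let rev2 := word2.toList.reverse
  let lastJ := yoohetLastIdx rev1
  String.ofList (yoohetScan rev1 rev2 lastJ rev2.length)

-- ===== PRECONDITION & SPEC =====
def Spec_yoohet (word1 : String) (word2 : String) (out : String) : Prop := out = yoohet_alt word1 word2
instance (word1 : String) (word2 : String) (out : String) : Decidable (Spec_yoohet word1 word2 out) := by unfold Spec_yoohet; infer_instance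

-- ===== CLAIM (what is proved, stated in full; the proofs are below) =====
def Claim_equal_yoohet : Prop := ∀ (word1 : String) (word2 : String), Dom_yoohet word1 word2 → Spec_yoohet word1 word2 (yoohet word1 word2)

-- ===== LEMMAS AND PROOFS =====

-- The dict of Source B maps c to the LAST index of c in rev1 (snoc recurrence).
theorem lastIdx_snoc (l : List Char) (x : Char) (c : Char) :
    (yoohetLastIdx (l ++ [x])).get? c =
      if c = x then some l.length else (yoohetLastIdx l).get? c := by
  unfold yoohetLastIdx
  rw [List.zipIdx_append, List.foldl_append]
  simp [PySem.Dict.get?_insert]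

-- A's inner loop over rev1 computes exactly a lookup in that dict.
theorem innerA_eq (l : List Char) (c : Char) (i : Nat) (acc : Option (Nat × Nat)) :
    (List.range l.length).foldl
        (fun ci j => if c = l.getD j ' ' then some (i, j) else ci) acc =
      (match (yoohetLastIdx l).get? c with
        | some j => some (i, j)
        | none => acc) := by
  induction l using List.reverseRecOn generalizing acc with
  | nil => simp [yoohetLastIdx, PySem.Dict.get?_empty]
  | append_singleton l x ih =>
    rw [List.length_append, List.length_singleton, List.range_succ, List.foldl_append]
    have hcong : (List.range l.length).foldl
        (fun ci j => if c = (l ++ [x]).getD j ' ' then some (i, j) else ci) acc =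
        (List.range l.length).foldl
        (fun ci j => if c = l.getD j ' ' then some (i, j) else ci) acc := by
      apply PySem.List.foldl_congr_mem
      intro ci j hj
      rw [List.getD_append l [x] ' ' j (List.mem_range.mp hj)]
    rw [hcong, ih, lastIdx_snoc]
    by_cases hcx : c = x <;> simp [hcx]

-- A's outer loop, rendered through the dict, is B's descending scan.
theorem scan_eq (rev1 rev2 : List Char) (n : Nat) :
    yoohetScan rev1 rev2 (yoohetLastIdx rev1) n =
      (match (List.range n).foldl
          (fun ci i =>
            match (yoohetLastIdx rev1).get? (rev2.getD i ' ') with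
            | some j => some (i, j)
            | none => ci)
          (none : Option (Nat × Nat)) with
        | none => rev2.take (rev2.length / 2) ++ rev1.take (rev1.length / 2)
        | some (i, j) => rev2.take i ++ rev1.drop j) := by
  induction n with
  | zero => simp [yoohetScan]
  | succ n ih =>
    rw [List.range_succ, List.foldl_append]
    simp only [List.foldl_cons, List.foldl_nil]
    rw [yoohetScan]
    cases h : (yoohetLastIdx rev1).get? (rev2.getD n ' ') with
    | none => simp [ih]
    | some j => simp

theorem yoohet_eq_alt (word1 word2 : String) : yoohet word1 word2 = yoohet_alt word1 word2 := by
  unfold yoohet yoohet_alt yoohetCommon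
  dsimp only
  rw [scan_eq]
  apply congrArg
  have hf :
      (List.range word2.toList.reverse.length).foldl
        (fun ci i =>
          (List.range word1.toList.reverse.length).foldl
            (fun ci j =>
              if word2.toList.reverse.getD i ' ' = word1.toList.reverse.getD j ' ' then some (i, j)
              else ci)
            ci)
        (none : Option (Nat × Nat)) =
      (List.range word2.toList.reverse.length).foldl
        (fun ci i =>
          match (yoohetLastIdx word1.toList.reverse).get? (word2.toList.reverse.getD i ' ') with
          | some j => some (i, j)
          | none => ci)
        (none : Option (Nat × Nat)) :=
    by apply PySem.List.foldl_congr_mem; intro ci i _; exact innerA_eq _ _ _ _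
  rw [hf]

-- ===== VERDICT (by name: the statement is the Claim_ definition above) =====
theorem yoohet_spec : Claim_equal_yoohet := by
  intro word1 word2 _
  exact yoohet_eq_alt word1 word2
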